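-- pv_equiv track=rewrite | github.com/mahirlabibdihan/LLMSniffer | data/whodunit/train/0_GARGOYLE_1.py | max_truth_speakers
-- ===== SOURCE A (Python) =====
-- def max_truth_speakers(N, statements):
--     truth_speakers = [0]*N
--     for statement in statements:
--         for i in range(N):
--             if statement[i] == 'T':
--                 truth_speakers[i] += 1
--     max_truth = max(truth_speakers)
--     return truth_speakers.count(max_truth)
-- ===== SOURCE B (Python) =====
-- def max_truth_speakers(N, statements):
--     counts = sorted(sum(s[i] == 'T' for s in statements) for i in range(N))
--     top = counts[-1]
--     k = len(counts) - 1
--     while k > 0 and counts[k - 1] == top: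
--         k -= 1
--     return len(counts) - k
-- ===== Notes on version B (the rewrite author's own statement) =====
-- stated objective: alternative
-- what changed: B replaces A's mutable per-column counter array plus max()/count() scans by a sort-based algorithm: it sorts the column T-counts ascending, takes the last (largest) element, and walks an index down through the trailing run of equal values, returning the run's length.
import Mathlib
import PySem

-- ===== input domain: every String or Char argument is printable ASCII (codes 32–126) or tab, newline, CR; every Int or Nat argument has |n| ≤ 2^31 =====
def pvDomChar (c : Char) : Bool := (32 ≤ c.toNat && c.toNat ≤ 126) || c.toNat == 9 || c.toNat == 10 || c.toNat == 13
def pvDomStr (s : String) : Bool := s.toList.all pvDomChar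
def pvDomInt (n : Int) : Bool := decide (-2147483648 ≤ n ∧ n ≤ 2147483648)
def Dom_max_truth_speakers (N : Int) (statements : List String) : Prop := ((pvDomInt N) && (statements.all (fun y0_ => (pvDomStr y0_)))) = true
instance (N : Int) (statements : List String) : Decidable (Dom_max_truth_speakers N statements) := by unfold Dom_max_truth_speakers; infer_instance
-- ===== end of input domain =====

-- B sorts the per-column T-counts and measures the trailing run of the last (largest)
-- element, instead of A's mutable counter array plus max()/count() scans (alternative algorithm).

-- ===== PORT A =====
-- truth_speakers = [0]*N; nested row/column loops incrementing truth_speakers[i]; then count(max).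
def max_truth_speakers (N : Int) (statements : List String) : Int :=
  let init : List Int := List.replicate N.toNat 0
  let ts := statements.foldl (fun ts statement =>
    (PySem.List.pyRange 0 N 1).foldl (fun ts i =>
      if PySem.Str.pyGet? statement i = some 'T' then ts.modify i.toNat (· + 1) else ts) ts) init
  match PySem.List.max? ts (fun y => y) with
  | some m => (ts.count m : Int)
  | none => 0   -- unreachable under Pre_ (Python's max([]) raises ValueError)

-- ===== PORT B =====
-- the while loop 'while k > 0 and counts[k - 1] == top: k -= 1'
def pvRunDown (counts : List Int) (top : Int) (k : Nat) : Nat :=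
  if 0 < k ∧ PySem.List.pyGet? counts ((k : Int) - 1) = some top
  then pvRunDown counts top (k - 1)
  else k
termination_by k
decreasing_by omega

def max_truth_speakers_alt (N : Int) (statements : List String) : Int :=
  let counts := PySem.List.sorted ((PySem.List.pyRange 0 N 1).map (fun i =>
      statements.foldl (fun acc s => if PySem.Str.pyGet? s i = some 'T' then acc + 1 else acc)
        (0 : Int))) (fun c => c) false
  match PySem.List.pyGet? counts (-1) with
  | some top => (counts.length : Int) - (pvRunDown counts top (counts.length - 1) : Int)
  | none => 0   -- unreachable under Pre_ (Python's counts[-1] raises IndexError)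

-- ===== PRECONDITION & SPEC =====
-- Pre_ excludes exactly the inputs where Python A raises: N ≤ 0 (max of an empty list,
-- ValueError) and rows shorter than N (IndexError).
def Pre_max_truth_speakers (N : Int) (statements : List String) : Prop :=
  1 ≤ N ∧ ∀ s ∈ statements, N ≤ (s.toList.length : Int)
instance (N : Int) (statements : List String) : Decidable (Pre_max_truth_speakers N statements) := by
  unfold Pre_max_truth_speakers; infer_instance

def pvWitness_max_truth_speakers : Int × List String := (2, ["TF", "TT"])

def Spec_max_truth_speakers (N : Int) (statements : List String) (out : Int) : Prop := out = max_truth_speakers_alt N statements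
instance (N : Int) (statements : List String) (out : Int) : Decidable (Spec_max_truth_speakers N statements out) := by unfold Spec_max_truth_speakers; infer_instance

-- ===== CLAIM (what is proved, stated in full; the proofs are below) =====
def Claim_equal_max_truth_speakers : Prop := ∀ (N : Int) (statements : List String), Dom_max_truth_speakers N statements → Pre_max_truth_speakers N statements → Spec_max_truth_speakers N statements (max_truth_speakers N statements)

-- ===== LEMMAS AND PROOFS =====

-- the per-column T-count both ports compute
def pvColT (statements : List String) (i : Int) : Int :=
  statements.foldl (fun acc s => if PySem.Str.pyGet? s i = some 'T' then acc + 1 else acc) 0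

-- Pointwise effect of one row's modify-fold over an arbitrary index list l.
theorem pv_foldl_modify_get (p : Nat → Prop) [DecidablePred p] (l : List Nat) (ts : List Int) (k : Nat) :
    (l.foldl (fun ts i => if p i then ts.modify i (· + 1) else ts) ts)[k]?
      = (ts[k]?).map (fun v => v + if p k then (l.count k : Int) else 0) := by
  induction l generalizing ts with
  | nil => simp
  | cons i l ih =>
    simp only [List.foldl_cons]
    by_cases hpi : p i
    · rw [if_pos hpi, ih]
      by_cases hik : i = k
      · subst hik
        rw [List.getElem?_modify, if_pos hpi, List.count_cons_self]
        cases ts[i]? with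
        | none => rfl
        | some v => rw [if_pos hpi] at *; simp; omega
      · rw [List.getElem?_modify]
        simp only [if_neg hik]
        simp [hik]
    · rw [if_neg hpi, ih]
      by_cases hik : i = k
      · subst hik
        simp [hpi]
      · simp [hik]

-- One row applied to a range-indexed map.
theorem pv_row (n : Nat) (p : Nat → Prop) [DecidablePred p] (f : Nat → Int) :
    ((List.range n).foldl (fun ts i => if p i then ts.modify i (· + 1) else ts) ((List.range n).map f))
      = (List.range n).map (fun k => if p k then f k + 1 else f k) := by
  apply List.ext_getElem?
  intro k
  rw [pv_foldl_modify_get]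
  by_cases hk : k < n
  · simp only [List.getElem?_map, List.getElem?_range hk]
    have hc : (List.range n).count k = 1 :=
      List.count_eq_one_of_mem (List.nodup_range) (List.mem_range.mpr hk)
    rw [hc]
    by_cases hpk : p k <;> simp [hpk]
  · have h1 : (List.range n)[k]? = none := by
      simp [hk]
    simp [List.getElem?_map, h1]

-- Accumulation over all rows equals per-column counts added to the initial values.
theorem pv_acc (n : Nat) (statements : List String) (f : Nat → Int) :
    statements.foldl (fun ts statement =>
        (List.range n).foldl (fun ts (i : Nat) =>
          if PySem.Str.pyGet? statement (i : Int) = some 'T' then ts.modify i (· + 1) else ts) ts)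
      ((List.range n).map f)
      = (List.range n).map (fun k =>
          f k + (statements.countP (fun s => decide (PySem.Str.pyGet? s (k : Int) = some 'T')) : Int)) := by
  induction statements generalizing f with
  | nil => simp
  | cons s rest ih =>
    simp only [List.foldl_cons]
    rw [pv_row n (fun i => PySem.Str.pyGet? s (i : Int) = some 'T') f, ih]
    apply List.map_congr_left
    intro k _
    simp only [List.countP_cons, PySem.Str.pyGet?_natCast]
    by_cases h : s.toList[k]? = some 'T'
    · simp [h]
      omega
    · simp [h]

-- A's accumulated array is the list of per-column counts.
theorem pv_ts_eq (N : Int) (statements : List String) :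
    (statements.foldl (fun ts statement =>
        (PySem.List.pyRange 0 N 1).foldl (fun ts i =>
          if PySem.Str.pyGet? statement i = some 'T' then ts.modify i.toNat (· + 1) else ts) ts)
      (List.replicate N.toNat 0 : List Int))
      = (PySem.List.pyRange 0 N 1).map (pvColT statements) := by
  have hrange : PySem.List.pyRange 0 N 1
      = List.map (fun (k : Nat) => (k : Int)) (List.range N.toNat) := by
    rw [PySem.List.pyRange_one]
    simp only [Int.sub_zero, zero_add]
  rw [hrange]
  have hinit : (List.replicate N.toNat 0 : List Int) = (List.range N.toNat).map (fun _ => 0) := by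
    rw [List.map_const', List.length_range]
  rw [hinit]
  have hstep : (fun (ts : List Int) (statement : String) =>
        (List.map (fun (k : Nat) => (k : Int)) (List.range N.toNat)).foldl (fun ts i =>
          if PySem.Str.pyGet? statement i = some 'T' then ts.modify i.toNat (· + 1) else ts) ts)
      = (fun (ts : List Int) (statement : String) =>
        (List.range N.toNat).foldl (fun ts (i : Nat) =>
          if PySem.Str.pyGet? statement (i : Int) = some 'T' then ts.modify i (· + 1) else ts) ts) := by
    funext ts statement
    rw [List.foldl_map]
    simp
  rw [hstep, pv_acc N.toNat statements (fun _ => 0), List.map_map]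
  apply List.map_congr_left
  intro k _
  simp only [Function.comp]
  unfold pvColT
  rw [PySem.List.foldl_ite_add_one]

-- On F ++ replicate cnt m with F free of m, the downward walk from |F| + d stops at |F|.
theorem pv_rundown (F : List Int) (m : Int) (cnt : Nat) (hF : ∀ x ∈ F, ¬ x = m)
    (d : Nat) (hd : d < cnt) :
    pvRunDown (F ++ List.replicate cnt m) m (F.length + d) = F.length := by
  induction d with
  | zero =>
    have hcond : ¬ (0 < F.length + 0 ∧
        PySem.List.pyGet? (F ++ List.replicate cnt m) ((F.length + 0 : Nat) - 1) = some m) := by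
      rintro ⟨hpos, hget⟩
      have hcast : ((F.length + 0 : Nat) : Int) - 1 = ((F.length - 1 : Nat) : Int) := by omega
      rw [hcast, PySem.List.pyGet?_natCast,
        List.getElem?_append_left (by omega),
        List.getElem?_eq_getElem (by omega)] at hget
      exact hF _ (List.getElem_mem _) (by injection hget)
    rw [pvRunDown, if_neg hcond]
    omega
  | succ d ih =>
    have hget : PySem.List.pyGet? (F ++ List.replicate cnt m) ((F.length + (d+1) : Nat) - 1)
        = some m := by
      have hcast : ((F.length + (d+1) : Nat) : Int) - 1 = ((F.length + d : Nat) : Int) := by omega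
      rw [hcast, PySem.List.pyGet?_natCast, List.getElem?_append_right (by omega)]
      have hsub : F.length + d - F.length = d := by omega
      rw [hsub, List.getElem?_replicate]
      rw [if_pos (by omega)]
    rw [pvRunDown, if_pos ⟨by omega, hget⟩]
    have hsub : F.length + (d + 1) - 1 = F.length + d := by omega
    rw [hsub]
    exact ih (by omega)

-- ===== VERDICT (by name: the statement is the Claim_ definition above) =====
theorem max_truth_speakers_spec : Claim_equal_max_truth_speakers := by
  intro N statements _ hpre
  unfold Spec_max_truth_speakers
  simp only [max_truth_speakers, max_truth_speakers_alt]
  rw [pv_ts_eq]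
  rw [show (fun i => List.foldl (fun acc s => if PySem.Str.pyGet? s i = some 'T' then acc + 1 else acc) (0 : Int) statements) = pvColT statements from rfl]
  set ts := (PySem.List.pyRange 0 N 1).map (pvColT statements) with hts
  obtain ⟨hN, -⟩ := hpre
  have hne : ts ≠ [] := by
    intro h
    have hlen := congrArg List.length h
    rw [hts] at hlen
    simp [PySem.List.length_pyRange_one] at hlen
    omega
  obtain ⟨x, t, hxt⟩ := List.exists_cons_of_ne_nil hne
  -- A's value: the count of the maximum m
  set m := t.foldl max x with hm
  have hmax : PySem.List.max? ts (fun y => y) = some m := by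
    rw [hxt]; exact PySem.List.max?_id_cons x t
  have hmle : ∀ y ∈ ts, y ≤ m := by
    intro y hy
    rw [hxt] at hy
    rcases List.mem_cons.mp hy with h | h
    · subst h; exact (PySem.List.le_foldl_max t y).1
    · exact (PySem.List.le_foldl_max t x).2 y h
  have hmmem : m ∈ ts := by
    rw [hxt]
    rcases PySem.List.foldl_max_mem t x with h | h
    · rw [hm, h]; exact List.mem_cons_self
    · exact List.mem_cons_of_mem x (hm ▸ h)
  -- name the sorted list: the elements below m, then the block of all cnt copies of m
  set F := PySem.List.sorted (ts.filter (fun y => !(y == m))) (fun c => c) false with hF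
  set cnt := ts.count m with hcnt
  have hFperm : F.Perm (ts.filter (fun y => !(y == m))) :=
    PySem.List.sorted_perm (ts.filter (fun y => !(y == m))) _ _
  have hsorted : PySem.List.sorted ts (fun c => c) false = F ++ List.replicate cnt m := by
    apply PySem.List.sorted_id_eq_of_perm_of_pairwise
    · have heq : ts.filter (fun y => y == m) = List.replicate cnt m := List.filter_beq m
      have p1 : (F ++ List.replicate cnt m).Perm
          (ts.filter (fun y => !(y == m)) ++ ts.filter (fun y => y == m)) := by
        rw [heq]
        exact hFperm.append_right _
      have p2 : (ts.filter (fun y => !(y == m)) ++ ts.filter (fun y => y == m)).Perm ts :=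
        List.perm_append_comm.trans (List.filter_append_perm (fun y => y == m) ts)
      exact p1.trans p2
    · apply List.pairwise_append.mpr
      refine ⟨PySem.List.sorted_pairwise (ts.filter (fun y => !(y == m))) _, ?_, ?_⟩
      · exact List.pairwise_replicate.mpr (Or.inr le_rfl)
      · intro a ha b hb
        rw [List.eq_of_mem_replicate hb]
        exact hmle a (List.mem_of_mem_filter (hFperm.mem_iff.mp ha))
  have hFne : ∀ y ∈ F, ¬ y = m := by
    intro y hy
    simpa using List.of_mem_filter (hFperm.mem_iff.mp hy)
  have hcnt1 : 1 ≤ cnt := List.count_pos_iff.mpr hmmem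
  -- counts[-1] = m
  have hget : PySem.List.pyGet? (F ++ List.replicate cnt m) (-1) = some m := by
    rw [PySem.List.pyGet?_neg_one]
    have hrep : (List.replicate cnt m).getLast? = some m := by
      rw [List.getLast?_replicate]
      simp only [if_neg (by omega : ¬ cnt = 0)]
    rw [List.getLast?_append]
    simp [hrep]
  -- finish: B returns length - |F| = cnt = ts.count m = A's value
  rw [hmax, hsorted, hget]
  simp only
  have hrun := pv_rundown F m cnt hFne (cnt - 1) (by omega)
  have hidx : (F ++ List.replicate cnt m).length - 1 = F.length + (cnt - 1) := by
    simp; omega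
  rw [hidx, hrun, hcnt]
  simp
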